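-- pv_equiv track=rewrite | github.com/mmsolovev/mishgan-twitch-bot | services/recommendation_metadata_service.py | _get_supported_platform_tokens
-- ===== SOURCE A (Python) =====
-- _PC_MARKERS = {"pc (microsoft windows)", "linux", "mac"}
--
-- _PS_MARKERS = {"playstation 5", "playstation 4", "playstation 3", "playstation 2", "playstation"}
--
-- def _extract_nested_value(item: dict, key: str) -> str:
--     current = item
--     for part in key.split("."):
--         if not isinstance(current, dict):
--             return ""
--         current = current.get(part)
--     return current.strip() if isinstance(current, str) else ""
--
-- def _get_supported_platform_tokens(items: list[dict] | None) -> set[str]: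
--     if not items:
--         return set()
--
--     normalized = {(_extract_nested_value(item, "name") or "").casefold() for item in items}
--     result = set()
--     if normalized & _PC_MARKERS:
--         result.add("PC")
--     if normalized & _PS_MARKERS:
--         result.add("PS")
--     return result
-- ===== SOURCE B (Python) =====
-- _PC_MARKERS = {"pc (microsoft windows)", "linux", "mac"}
--
-- _PS_MARKERS = {"playstation 5", "playstation 4", "playstation 3", "playstation 2", "playstation"}
--
--
-- def _get_supported_platform_tokens(items):
--     # One pass with two flags; no intermediate normalized set, no set intersections.
--     if not items:
--         return set()
--     has_pc = has_ps = False
--     for item in items: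
--         value = item.get("name")
--         name = value.strip().casefold() if isinstance(value, str) else ""
--         if name in _PC_MARKERS:
--             has_pc = True
--         elif name in _PS_MARKERS:
--             has_ps = True
--         if has_pc and has_ps:
--             break
--     result = set()
--     if has_pc:
--         result.add("PC")
--     if has_ps:
--         result.add("PS")
--     return result
-- ===== Notes on version B (the rewrite author's own statement) =====
-- stated objective: simpler
-- what changed: Replaces the build-a-normalized-set-then-intersect-twice shape with a single pass over the items that maintains two boolean flags (PC seen / PS seen) and stops early once both are found; the generic dotted-key helper _extract_nested_value is dropped since the key is the fixed top-level 'name'.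
import Mathlib
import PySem

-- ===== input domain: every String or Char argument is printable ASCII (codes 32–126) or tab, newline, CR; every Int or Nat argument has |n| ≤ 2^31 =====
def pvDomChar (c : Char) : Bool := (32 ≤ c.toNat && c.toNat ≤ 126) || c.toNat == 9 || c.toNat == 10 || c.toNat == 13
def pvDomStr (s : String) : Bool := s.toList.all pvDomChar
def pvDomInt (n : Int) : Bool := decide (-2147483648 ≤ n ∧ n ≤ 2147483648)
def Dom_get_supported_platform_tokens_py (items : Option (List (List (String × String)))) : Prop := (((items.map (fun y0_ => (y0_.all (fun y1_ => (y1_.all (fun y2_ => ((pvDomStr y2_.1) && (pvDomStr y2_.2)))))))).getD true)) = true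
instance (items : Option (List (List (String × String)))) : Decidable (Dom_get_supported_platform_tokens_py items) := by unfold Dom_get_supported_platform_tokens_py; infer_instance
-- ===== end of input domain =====

-- B replaces A's normalized-set-plus-two-intersections shape with a single pass over the
-- items maintaining two boolean flags (objective: simpler; same O(n) cost).


-- ===== PORT A =====
def pcMarkers : PySem.Set String :=
  PySem.Set.ofList ["pc (microsoft windows)", "linux", "mac"]

def psMarkers : PySem.Set String :=
  PySem.Set.ofList ["playstation 5", "playstation 4", "playstation 3", "playstation 2", "playstation"]

-- state of the helper's loop variable `current`: a dict, a value fetched by .get (possibly None),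
-- or the early `return ""` taken when `current` is no longer a dict
inductive PyCur where
  | dict : List (String × String) → PyCur
  | val : Option String → PyCur
  | bail : PyCur

-- literal port of _extract_nested_value (values of our typed dicts are strings)
def extractNestedValue (item : List (String × String)) (key : String) : String :=
  let fin := (((PySem.Str.split? key ".").getD [])).foldl
    (fun cur part =>
      match cur with
      | PyCur.dict d => PyCur.val (PySem.Dict.get? (PySem.Dict.mk d) part)
      | PyCur.val _ => PyCur.bail   -- `if not isinstance(current, dict): return ""`
      | PyCur.bail => PyCur.bail)
    (PyCur.dict item)
  match fin with
  | PyCur.val (some s) => PySem.Str.strip s   -- `current.strip() if isinstance(current, str)`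
  | _ => ""                                   -- None / dict / early return → ""

def get_supported_platform_tokens_py (items : Option (List (List (String × String)))) : List String :=
  match items with
  | none => []
  | some l =>
    if l = [] then []
    else
      -- {(_extract_nested_value(item, "name") or "").casefold() for item in items}
      let normalized : PySem.Set String := PySem.Set.ofList (l.map (fun item =>
        let e := extractNestedValue item "name"
        PySem.Str.lower (if e = "" then "" else e)))   -- casefold = lower on the ASCII domain
      let result : PySem.Set String := PySem.Set.empty
      let result := if PySem.Set.inter normalized pcMarkers ≠ [] then PySem.Set.add result "PC" else result
      let result := if PySem.Set.inter normalized psMarkers ≠ [] then PySem.Set.add result "PS" else result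
      result

-- ===== PORT B =====
-- the for-loop of Source B: two flags, early break when both are set
def altLoop : List (List (String × String)) → Bool → Bool → Bool × Bool
  | [], hasPc, hasPs => (hasPc, hasPs)
  | item :: rest, hasPc, hasPs =>
    let name := match PySem.Dict.get? (PySem.Dict.mk item) "name" with
      | some v => PySem.Str.lower (PySem.Str.strip v)   -- value.strip().casefold()
      | none => ""
    let hasPc := hasPc || pcMarkers.contains name
    let hasPs := hasPs || (!pcMarkers.contains name && psMarkers.contains name)  -- elif
    if hasPc && hasPs then (hasPc, hasPs) else altLoop rest hasPc hasPs

def get_supported_platform_tokens_py_alt (items : Option (List (List (String × String)))) : List String :=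
  match items with
  | none => []
  | some l =>
    if l = [] then []
    else
      let (hasPc, hasPs) := altLoop l false false
      let result : PySem.Set String := PySem.Set.empty
      let result := if hasPc then PySem.Set.add result "PC" else result
      let result := if hasPs then PySem.Set.add result "PS" else result
      result

-- ===== PRECONDITION & SPEC =====
def Spec_get_supported_platform_tokens_py (items : Option (List (List (String × String)))) (out : List String) : Prop := out = get_supported_platform_tokens_py_alt items
instance (items : Option (List (List (String × String)))) (out : List String) : Decidable (Spec_get_supported_platform_tokens_py items out) := by unfold Spec_get_supported_platform_tokens_py; infer_instance

-- ===== CLAIM (what is proved, stated in full; the proofs are below) =====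
def Claim_equal_get_supported_platform_tokens_py : Prop := ∀ (items : Option (List (List (String × String)))), Dom_get_supported_platform_tokens_py items → Spec_get_supported_platform_tokens_py items (get_supported_platform_tokens_py items)

-- ===== LEMMAS AND PROOFS =====

-- the per-item normalized name, shared shape of both sides
def normName (item : List (String × String)) : String :=
  match PySem.Dict.get? (PySem.Dict.mk item) "name" with
  | some v => PySem.Str.lower (PySem.Str.strip v)
  | none => ""

theorem extract_name (item : List (String × String)) :
    extractNestedValue item "name" =
      match PySem.Dict.get? (PySem.Dict.mk item) "name" with
      | some v => PySem.Str.strip v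
      | none => "" := by
  have h : PySem.Str.split? "name" "." = some ["name"] := by decide
  simp only [extractNestedValue, h, Option.getD_some, List.foldl_cons, List.foldl_nil]
  cases PySem.Dict.get? (PySem.Dict.mk item) "name" <;> rfl

theorem normA (item : List (String × String)) :
    (let e := extractNestedValue item "name"
     PySem.Str.lower (if e = "" then "" else e)) = normName item := by
  simp only [extract_name, normName]
  cases h : PySem.Dict.get? (PySem.Dict.mk item) "name" with
  | none => rfl
  | some v =>
    by_cases he : PySem.Str.strip v = "" <;> simp [he]

theorem inter_ne_iff (l : List (List (String × String))) (m : PySem.Set String) :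
    (PySem.Set.inter (PySem.Set.ofList (l.map (fun item =>
        let e := extractNestedValue item "name"
        PySem.Str.lower (if e = "" then "" else e)))) m ≠ []) ↔
      l.any (fun item => m.contains (normName item)) = true := by
  have hf : (fun item => (let e := extractNestedValue item "name"
      PySem.Str.lower (if e = "" then "" else e))) = normName := funext normA
  rw [hf]
  constructor
  · intro h
    obtain ⟨y, hy⟩ := List.exists_mem_of_ne_nil _ h
    rw [PySem.Set.mem_inter, PySem.Set.mem_ofList] at hy
    obtain ⟨hy1, hy2⟩ := hy
    obtain ⟨item, hi, rfl⟩ := List.mem_map.mp hy1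
    rw [List.any_eq_true]
    exact ⟨item, hi, (PySem.Set.contains_iff _ _).mpr hy2⟩
  · intro h
    obtain ⟨item, hi, hc⟩ := List.any_eq_true.mp h
    have : normName item ∈ PySem.Set.inter (PySem.Set.ofList (l.map normName)) m := by
      rw [PySem.Set.mem_inter, PySem.Set.mem_ofList]
      exact ⟨List.mem_map.mpr ⟨item, hi, rfl⟩, (PySem.Set.contains_iff _ _).mp hc⟩
    exact List.ne_nil_of_mem this

theorem altLoop_eq (l : List (List (String × String))) (pc ps : Bool) :
    altLoop l pc ps =
      (pc || l.any (fun item => pcMarkers.contains (normName item)),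
       ps || l.any (fun item => !pcMarkers.contains (normName item) && psMarkers.contains (normName item))) := by
  induction l generalizing pc ps with
  | nil => simp [altLoop]
  | cons item rest ih =>
    have hb : altLoop (item :: rest) pc ps =
        (if ((pc || pcMarkers.contains (normName item)) &&
              (ps || (!pcMarkers.contains (normName item) && psMarkers.contains (normName item)))) = true
         then (pc || pcMarkers.contains (normName item),
               ps || (!pcMarkers.contains (normName item) && psMarkers.contains (normName item)))
         else altLoop rest (pc || pcMarkers.contains (normName item))
                (ps || (!pcMarkers.contains (normName item) && psMarkers.contains (normName item)))) := rfl
    rw [hb, List.any_cons, List.any_cons]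
    split
    next h =>
      rw [Bool.and_eq_true] at h
      simp only [← Bool.or_assoc, h.1, h.2, Bool.true_or]
    next _ =>
      rw [ih]
      simp only [Bool.or_assoc]

theorem markers_disjoint (s : String) :
    (!pcMarkers.contains s && psMarkers.contains s) = psMarkers.contains s := by
  cases hp : psMarkers.contains s with
  | false => simp
  | true =>
    have hs : s ∈ psMarkers := (PySem.Set.contains_iff _ _).mp hp
    have hm : s ∈ (["playstation 5", "playstation 4", "playstation 3", "playstation 2",
        "playstation"] : List String) := by
      simpa [psMarkers, PySem.Set.mem_ofList] using hs
    have hpc : pcMarkers.contains s = false := by fin_cases hm <;> decide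
    rw [hpc]
    rfl

theorem ps_flag_eq (l : List (List (String × String))) :
    l.any (fun item => !pcMarkers.contains (normName item) && psMarkers.contains (normName item)) =
      l.any (fun item => psMarkers.contains (normName item)) := by
  simp only [markers_disjoint]

-- ===== VERDICT (by name: the statement is the Claim_ definition above) =====
theorem get_supported_platform_tokens_py_spec : Claim_equal_get_supported_platform_tokens_py := by
  intro items _
  unfold Spec_get_supported_platform_tokens_py
  match items with
  | none => rfl
  | some l =>
    simp only [get_supported_platform_tokens_py, get_supported_platform_tokens_py_alt]
    by_cases hl : l = []
    · simp [hl]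
    · simp only [if_neg hl, altLoop_eq, Bool.false_or, ps_flag_eq]
      simp only [inter_ne_iff]
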